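-- pv_equiv track=rewrite | github.com/kmclaugh/Photoresistor_Array | photoresistor_array_test.py | max_combinations
-- ===== SOURCE A (Python) =====
-- import itertools
--
-- def max_combinations(array_size,max_number=16):
--     """Returns a binary string list of the first possible combinations up to the max number of tests
--         given"""
--     total_resistors = array_size[0]*array_size[1]
--     all_combos = []
--     total_count = 0
--     for seq in itertools.product("01", repeat=total_resistors):
--         if total_count > max_number-1:
--             break
--         this_value = "".join(seq)
--         all_combos.append(this_value)
--         total_count += 1
--     return(all_combos)
-- ===== SOURCE B (Python) =====
-- def max_combinations(array_size, max_number=16):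
--     t = array_size[0] * array_size[1]
--     n = min(max_number, 2 ** t)
--     # render at width t+1 and drop the leading pad digit, so t == 0 correctly yields ''
--     return [format(i, '0%db' % (t + 1))[1:] for i in range(n)]
-- ===== Notes on version B (the rewrite author's own statement) =====
-- stated objective: alternative
-- what changed: B replaces itertools.product tuple enumeration with closed-form rendering: n = min(max_number, 2**total_resistors) and each output string is its index i formatted as zero-padded binary (width t+1 with the leading pad digit dropped, so t=0 yields '').
-- outside the precondition, e.g. on max_combinations((-1, 2), 5): A raises ValueError, B raises TypeError
import Mathlib
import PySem

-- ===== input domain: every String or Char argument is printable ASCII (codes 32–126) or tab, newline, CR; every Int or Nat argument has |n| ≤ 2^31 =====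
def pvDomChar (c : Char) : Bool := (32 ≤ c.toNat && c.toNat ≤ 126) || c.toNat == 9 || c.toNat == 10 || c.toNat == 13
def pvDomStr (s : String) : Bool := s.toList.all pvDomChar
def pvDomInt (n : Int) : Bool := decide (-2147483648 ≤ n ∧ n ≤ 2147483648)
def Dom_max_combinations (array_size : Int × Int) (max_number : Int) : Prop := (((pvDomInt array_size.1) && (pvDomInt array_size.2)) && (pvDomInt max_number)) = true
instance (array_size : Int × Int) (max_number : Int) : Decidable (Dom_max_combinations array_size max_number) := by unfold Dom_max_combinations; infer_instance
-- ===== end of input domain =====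

-- B replaces itertools.product enumeration with direct integer-to-binary rendering of
-- each index i < min(max_number, 2**total_resistors) (idiomatic closed-form alternative).


-- ===== PORT A =====
-- lazy model of the itertools.product("01", repeat=t) iterator: the lexicographic
-- successor of the current tuple (none = iterator exhausted), so the port, like
-- Python's for-loop over the lazy iterator, never materialises all 2^t tuples
def pvNext : List Char → Option (List Char)
  | [] => none
  | c :: rest =>
    match pvNext rest with
    | some r => some (c :: r)
    | none => if c == '0' then some ('1' :: List.replicate rest.length '0') else none

-- A's for-loop with its break / counter / accumulator state; the fuel only makes the
-- recursion structural: it is max_number.toNat + 1, and the loop breaks on the counter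
-- (or iterator exhaustion) strictly before the fuel can run out
def pvALoop : Nat → Option (List Char) → Int → Int → List String → List String
  | _, none, _, _, acc => acc
  | 0, some _, _, _, acc => acc
  | fuel + 1, some s, mn, cnt, acc =>
    if cnt > mn - 1 then acc
    else pvALoop fuel (pvNext s) mn (cnt + 1) (acc ++ [String.mk s])

def max_combinations (array_size : Int × Int) (max_number : Int) : List String :=
  -- .toNat is exact: Pre_ requires 0 ≤ total_resistors (negative repeat raises ValueError)
  let total_resistors := (array_size.1 * array_size.2).toNat
  pvALoop (max_number.toNat + 1) (some (List.replicate total_resistors '0')) max_number 0 []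

-- ===== PORT B =====
-- binary digits of i, most significant first ([] for 0), as Python's bin(i) digits
def pvBin (i : Nat) : List Char :=
  if h : i = 0 then []
  else pvBin (i / 2) ++ [if i % 2 == 1 then '1' else '0']
decreasing_by omega

-- exact port of format(i, '0kb'): bin(i)'s digits ('0' for i = 0) left-padded with '0' to width k
def pvFormatBin (k i : Nat) : List Char :=
  let d := if i = 0 then ['0'] else pvBin i
  List.replicate (k - d.length) '0' ++ d

def max_combinations_alt (array_size : Int × Int) (max_number : Int) : List String :=
  let t := (array_size.1 * array_size.2).toNat   -- exact under Pre_ (0 ≤ product)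
  let n : Int := min max_number ((2 : Int) ^ t)
  -- i.toNat is exact: every i in range(n) is nonnegative; [1:] on the format string = .drop 1
  (PySem.List.pyRange 0 n 1).map (fun i =>
    String.mk ((pvFormatBin (t + 1) i.toNat).drop 1))

-- ===== PRECONDITION & SPEC =====
-- Pre_ excludes exactly a negative resistor count, where A's itertools.product raises ValueError.
def Pre_max_combinations (array_size : Int × Int) (max_number : Int) : Prop :=
  0 ≤ array_size.1 * array_size.2
instance (array_size : Int × Int) (max_number : Int) : Decidable (Pre_max_combinations array_size max_number) := by unfold Pre_max_combinations; infer_instance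
def pvWitness_max_combinations : (Int × Int) × Int := ((2, 2), 5)

def Spec_max_combinations (array_size : Int × Int) (max_number : Int) (out : List String) : Prop := out = max_combinations_alt array_size max_number
instance (array_size : Int × Int) (max_number : Int) (out : List String) : Decidable (Spec_max_combinations array_size max_number out) := by unfold Spec_max_combinations; infer_instance

-- ===== CLAIM (what is proved, stated in full; the proofs are below) =====
def Claim_equal_max_combinations : Prop := ∀ (array_size : Int × Int) (max_number : Int), Dom_max_combinations array_size max_number → Pre_max_combinations array_size max_number → Spec_max_combinations array_size max_number (max_combinations array_size max_number)

-- ===== LEMMAS AND PROOFS =====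

-- B's rendering of index i at width t
def pvBits (t i : Nat) : List Char :=
  (List.range t).map (fun j => if (i >>> (t - 1 - j)) &&& 1 == 1 then '1' else '0')

theorem pvBit_eq_testBit (i k : Nat) :
    (if (i >>> k) &&& 1 == 1 then '1' else '0') = (if i.testBit k then '1' else '0') := by
  simp [Nat.testBit]

theorem pvBits_succ (t i : Nat) :
    pvBits (t + 1) i = (if i.testBit t then '1' else '0') :: pvBits t i := by
  unfold pvBits
  rw [List.range_succ_eq_map]
  simp only [List.map_cons, List.map_map]
  congr 1
  · rw [show t + 1 - 1 - 0 = t from by omega, pvBit_eq_testBit]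
  · apply List.map_congr_left
    intro j _
    simp only [Function.comp, Nat.succ_eq_add_one]
    rw [show t + 1 - 1 - (j + 1) = t - 1 - j from by omega]

theorem pvBits_length (t i : Nat) : (pvBits t i).length = t := by
  simp [pvBits]

theorem pvBits_zero (t : Nat) : pvBits t 0 = List.replicate t '0' := by
  unfold pvBits
  rw [List.eq_replicate_iff]
  constructor
  · simp
  · intro c hc
    obtain ⟨j, _, rfl⟩ := List.mem_map.mp hc
    rw [pvBit_eq_testBit, Nat.zero_testBit]
    simp

theorem pvBits_low (t r : Nat) : pvBits t (2 ^ t + r) = pvBits t r := by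
  unfold pvBits
  apply List.map_congr_left
  intro j hj
  have hj' := List.mem_range.mp hj
  rw [pvBit_eq_testBit, pvBit_eq_testBit, Nat.testBit_two_pow_add_gt (by omega)]

theorem pvNext_bits (t : Nat) : ∀ (k : Nat), k < 2 ^ t →
    pvNext (pvBits t k) = if k + 1 < 2 ^ t then some (pvBits t (k + 1)) else none := by
  induction t with
  | zero =>
    intro k hk
    interval_cases k
    simp [pvBits, pvNext]
  | succ t ih =>
    intro k hk
    by_cases hlow : k < 2 ^ t
    · -- top bit 0
      rw [pvBits_succ, Nat.testBit_lt_two_pow hlow, if_neg (by simp)]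
      rw [pvNext, ih k hlow]
      by_cases h1 : k + 1 < 2 ^ t
      · rw [if_pos h1]
        have : k + 1 < 2 ^ (t + 1) := by have := Nat.pow_lt_pow_succ (a := 2) (by omega) (n := t); omega
        rw [if_pos this, pvBits_succ, Nat.testBit_lt_two_pow h1]
        simp
      · rw [if_neg h1]
        have hk1 : k + 1 = 2 ^ t := by omega
        have h2 : k + 1 < 2 ^ (t + 1) := by
          have : 2 ^ (t + 1) = 2 ^ t + 2 ^ t := by ring
          have h0 : 0 < 2 ^ t := Nat.two_pow_pos t
          omega
        simp only []
        rw [if_pos h2, hk1, pvBits_succ,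
          show (2 ^ t : Nat) = 2 ^ t + 0 from by omega, Nat.testBit_two_pow_add_eq,
          Nat.zero_testBit, pvBits_low, pvBits_zero, pvBits_length]
        simp
    · -- top bit 1: k = 2^t + r
      obtain ⟨r, rfl⟩ : ∃ r, k = 2 ^ t + r := ⟨k - 2 ^ t, by omega⟩
      have hr : r < 2 ^ t := by
        have : 2 ^ (t + 1) = 2 ^ t + 2 ^ t := by ring
        omega
      rw [pvBits_succ, Nat.testBit_two_pow_add_eq, Nat.testBit_lt_two_pow hr]
      simp only [Bool.not_false]
      rw [pvBits_low, pvNext, ih r hr]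
      by_cases h1 : r + 1 < 2 ^ t
      · rw [if_pos h1]
        have h2 : 2 ^ t + r + 1 < 2 ^ (t + 1) := by
          have : 2 ^ (t + 1) = 2 ^ t + 2 ^ t := by ring
          omega
        rw [if_pos h2, show 2 ^ t + r + 1 = 2 ^ t + (r + 1) from by omega,
          pvBits_succ, Nat.testBit_two_pow_add_eq, Nat.testBit_lt_two_pow h1, pvBits_low]
        simp
      · rw [if_neg h1]
        have h2 : ¬ (2 ^ t + r + 1 < 2 ^ (t + 1)) := by
          have : 2 ^ (t + 1) = 2 ^ t + 2 ^ t := by ring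
          omega
        rw [if_neg h2]
        simp

theorem pvALoop_eq (t : Nat) (m : Int) : ∀ (fuel k : Nat) (cnt : Int) (acc : List String),
    k < 2 ^ t → (m - cnt).toNat ≤ fuel →
    pvALoop fuel (some (pvBits t k)) m cnt acc
      = acc ++ (List.range' k (min (m - cnt).toNat (2 ^ t - k))).map
          (fun i => String.mk (pvBits t i)) := by
  intro fuel
  induction fuel with
  | zero =>
    intro k cnt acc hk hf
    have : (m - cnt).toNat = 0 := by omega
    simp [pvALoop, this]
  | succ fuel ih =>
    intro k cnt acc hk hf
    rw [pvALoop]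
    by_cases hbrk : cnt > m - 1
    · rw [if_pos hbrk]
      have : (m - cnt).toNat = 0 := by omega
      simp [this]
    · rw [if_neg hbrk]
      have hm1 : 1 ≤ (m - cnt).toNat := by omega
      rw [pvNext_bits t k hk]
      by_cases h1 : k + 1 < 2 ^ t
      · rw [if_pos h1, ih (k + 1) (cnt + 1) _ h1 (by omega)]
        have hmin : min (m - cnt).toNat (2 ^ t - k)
            = (min (m - (cnt + 1)).toNat (2 ^ t - (k + 1))) + 1 := by omega
        rw [hmin, List.range'_succ]
        simp
      · rw [if_neg h1, pvALoop]
        have hmin : min (m - cnt).toNat (2 ^ t - k) = 1 := by omega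
        rw [hmin]
        simp [List.range'_succ]

theorem pvBits_snoc (t i : Nat) :
    pvBits (t + 1) i = pvBits t (i / 2) ++ [if i % 2 == 1 then '1' else '0'] := by
  unfold pvBits
  rw [List.range_succ, List.map_append]
  congr 1
  · apply List.map_congr_left
    intro j hj
    have hj' := List.mem_range.mp hj
    have hdiv : i / 2 = i >>> 1 := (Nat.shiftRight_one i).symm
    rw [hdiv, ← Nat.shiftRight_add, show 1 + (t - 1 - j) = t + 1 - 1 - j from by omega]
  · simp [Nat.and_one_is_mod]

theorem pvBits_pad (t : Nat) : ∀ i, i < 2 ^ t →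
    pvBits t i = List.replicate (t - (pvBin i).length) '0' ++ pvBin i := by
  induction t with
  | zero =>
    intro i hi
    interval_cases i
    simp [pvBits, pvBin]
  | succ t ih =>
    intro i hi
    have h2 : 2 ^ (t + 1) = 2 ^ t + 2 ^ t := by ring
    have hdiv : i / 2 < 2 ^ t := by omega
    rw [pvBits_snoc, ih (i / 2) hdiv]
    by_cases h0 : i = 0
    · subst h0
      rw [pvBin]
      simp [← List.replicate_succ' (n := t)]
    · have hbin : pvBin i = pvBin (i / 2) ++ [if i % 2 == 1 then '1' else '0'] := by
        rw [pvBin, dif_neg h0]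
      rw [hbin]
      have hlen : (pvBin (i / 2) ++ [if i % 2 == 1 then '1' else '0']).length
          = (pvBin (i / 2)).length + 1 := by simp
      rw [hlen, show t + 1 - ((pvBin (i / 2)).length + 1) = t - (pvBin (i / 2)).length from by omega]
      simp

theorem pvFormat_eq (t i : Nat) (hi : i < 2 ^ t) :
    (pvFormatBin (t + 1) i).drop 1 = pvBits t i := by
  have key : pvFormatBin (t + 1) i = pvBits (t + 1) i := by
    by_cases h0 : i = 0
    · subst h0
      rw [pvBits_zero, pvFormatBin]
      simp [← List.replicate_succ' (n := t)]
    · have hi' : i < 2 ^ (t + 1) := by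
        have : 2 ^ (t + 1) = 2 ^ t + 2 ^ t := by ring
        omega
      rw [pvFormatBin, pvBits_pad (t + 1) i hi']
      simp [h0]
  rw [key, pvBits_succ]
  simp

theorem pvToNat_min (m : Int) (t : Nat) :
    (min m ((2 : Int) ^ t)).toNat = min m.toNat (2 ^ t) := by
  have h : ((2 : Int) ^ t) = ((2 ^ t : Nat) : Int) := by push_cast; ring
  rw [h]
  generalize (2 ^ t : Nat) = N
  omega

-- ===== VERDICT (by name: the statement is the Claim_ definition above) =====
theorem max_combinations_spec : Claim_equal_max_combinations := by
  intro a m _ _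
  unfold Spec_max_combinations max_combinations max_combinations_alt
  dsimp only
  have hpos : 0 < 2 ^ (a.1 * a.2).toNat := Nat.two_pow_pos _
  rw [← pvBits_zero, pvALoop_eq _ m _ 0 0 [] hpos (by omega)]
  simp only [PySem.List.pyRange_one, pvToNat_min, Int.sub_zero, List.map_map,
    List.nil_append, Nat.sub_zero, ← List.range_eq_range']
  apply List.map_congr_left
  intro k hk
  have hk' : k < 2 ^ (a.1 * a.2).toNat :=
    lt_of_lt_of_le (List.mem_range.mp hk) (min_le_right _ _)
  simp only [Function.comp]
  have h0 : ((0 : Int) + (k : Int)).toNat = k := by omega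
  rw [h0, pvFormat_eq _ k hk']
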